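-- pv_equiv track=rewrite | github.com/vedsathwik275/envision | envision_product/neural/backend/services/prediction_service.py | _filter_tender_performance_predictions
-- ===== SOURCE A (Python) =====
-- from typing import Dict, List, Optional, Any, Union
--
-- def _filter_tender_performance_predictions(predictions: List[Dict], filters: Dict) -> List[Dict]:
--     """Apply filters specific to tender performance predictions."""
--     result = []
--
--     # Extract filter criteria
--     source_cities = filters.get("source_cities", [])
--     destination_cities = filters.get("destination_cities", [])
--     carriers = filters.get("carriers", [])
--
--     for pred in predictions:
--         match = True
--
--         # Filter by carrier
--         if carriers and pred.get("carrier") not in carriers: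
--             match = False
--
--         # Filter by source city
--         if source_cities and pred.get("source_city") not in source_cities:
--             match = False
--
--         # Filter by destination city
--         if destination_cities and pred.get("dest_city") not in destination_cities:
--             match = False
--
--         if match:
--             result.append(pred)
--
--     return result
-- ===== SOURCE B (Python) =====
-- def _filter_tender_performance_predictions(predictions, filters):
--     """Apply each filter criterion as its own sequential filtering pass."""
--     result = list(predictions)
--     for key, field in (("carriers", "carrier"),
--                        ("source_cities", "source_city"),
--                        ("destination_cities", "dest_city")):
--         allowed = filters.get(key, [])
--         if allowed:
--             result = [p for p in result if p.get(field) in allowed]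
--     return result
-- ===== Notes on version B (the rewrite author's own statement) =====
-- stated objective: alternative
-- what changed: Replaced the single loop that combines three membership flags per prediction with three independent sequential filtering passes, one per active criterion, driven by a (key, field) table.
import Mathlib
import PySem

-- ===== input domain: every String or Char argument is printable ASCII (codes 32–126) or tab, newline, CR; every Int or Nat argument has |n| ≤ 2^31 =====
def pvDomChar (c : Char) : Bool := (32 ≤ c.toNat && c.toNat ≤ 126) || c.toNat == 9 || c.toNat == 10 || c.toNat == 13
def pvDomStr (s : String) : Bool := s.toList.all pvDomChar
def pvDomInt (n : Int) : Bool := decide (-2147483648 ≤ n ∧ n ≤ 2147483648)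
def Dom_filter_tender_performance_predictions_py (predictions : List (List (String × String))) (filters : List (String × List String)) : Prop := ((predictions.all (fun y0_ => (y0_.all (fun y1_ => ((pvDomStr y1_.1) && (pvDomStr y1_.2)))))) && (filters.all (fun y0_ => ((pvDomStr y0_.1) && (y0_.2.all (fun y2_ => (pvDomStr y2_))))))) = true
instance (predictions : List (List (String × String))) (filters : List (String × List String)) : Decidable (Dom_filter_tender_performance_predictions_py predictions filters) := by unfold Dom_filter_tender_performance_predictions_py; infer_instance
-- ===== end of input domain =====

-- B re-decomposes A's single flag-combining loop into three independent sequential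
-- filtering passes driven by a (filter-key, record-field) table; same cost, alternative structure.

-- `pred.get(field) in allowed` (a missing key gives None, which is never in a list of strings)
def pvOptMem (o : Option String) (allowed : List String) : Bool :=
  match o with
  | some v => allowed.contains v
  | none => false

-- ===== PORT A =====
def filter_tender_performance_predictions_py (predictions : List (List (String × String))) (filters : List (String × List String)) : List (List (String × String)) :=
  let source_cities := PySem.Dict.getD (PySem.Dict.mk filters) "source_cities" []
  let destination_cities := PySem.Dict.getD (PySem.Dict.mk filters) "destination_cities" []
  let carriers := PySem.Dict.getD (PySem.Dict.mk filters) "carriers" []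
  predictions.foldl (fun result pred =>
    let m := true
    let m := if !carriers.isEmpty && !pvOptMem (PySem.Dict.get? (PySem.Dict.mk pred) "carrier") carriers then false else m
    let m := if !source_cities.isEmpty && !pvOptMem (PySem.Dict.get? (PySem.Dict.mk pred) "source_city") source_cities then false else m
    let m := if !destination_cities.isEmpty && !pvOptMem (PySem.Dict.get? (PySem.Dict.mk pred) "dest_city") destination_cities then false else m
    if m then result ++ [pred] else result) []

-- ===== PORT B =====
-- one filtering pass: skipped entirely when the allowed list is empty ("empty means no filter")
def pvPass (field : String) (allowed : List String) (result : List (List (String × String))) : List (List (String × String)) :=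
  if allowed.isEmpty then result
  else result.filter (fun p => pvOptMem (PySem.Dict.get? (PySem.Dict.mk p) field) allowed)

def filter_tender_performance_predictions_py_alt (predictions : List (List (String × String))) (filters : List (String × List String)) : List (List (String × String)) :=
  [("carriers", "carrier"), ("source_cities", "source_city"), ("destination_cities", "dest_city")].foldl
    (fun result kv => pvPass kv.2 (PySem.Dict.getD (PySem.Dict.mk filters) kv.1 []) result) predictions

-- ===== PRECONDITION & SPEC =====
def Spec_filter_tender_performance_predictions_py (predictions : List (List (String × String))) (filters : List (String × List String)) (out : List (List (String × String))) : Prop := out = filter_tender_performance_predictions_py_alt predictions filters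
instance (predictions : List (List (String × String))) (filters : List (String × List String)) (out : List (List (String × String))) : Decidable (Spec_filter_tender_performance_predictions_py predictions filters out) := by unfold Spec_filter_tender_performance_predictions_py; infer_instance

-- ===== CLAIM (what is proved, stated in full; the proofs are below) =====
def Claim_equal_filter_tender_performance_predictions_py : Prop := ∀ (predictions : List (List (String × String))) (filters : List (String × List String)), Dom_filter_tender_performance_predictions_py predictions filters → Spec_filter_tender_performance_predictions_py predictions filters (filter_tender_performance_predictions_py predictions filters)

-- ===== LEMMAS AND PROOFS =====

-- a pass is a filter with a predicate that is vacuously true when the allowed list is empty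
theorem pvPass_eq_filter (field : String) (allowed : List String) (result : List (List (String × String))) :
    pvPass field allowed result
      = result.filter (fun p => allowed.isEmpty || pvOptMem (PySem.Dict.get? (PySem.Dict.mk p) field) allowed) := by
  unfold pvPass
  by_cases h : allowed.isEmpty
  · simp [h]
  · simp only [h]
    refine (List.filter_congr ?_).symm
    intro p _
    simp

-- ===== VERDICT (by name: the statement is the Claim_ definition above) =====
theorem filter_tender_performance_predictions_py_spec : Claim_equal_filter_tender_performance_predictions_py := by
  intro predictions filters _
  unfold Spec_filter_tender_performance_predictions_py
  unfold filter_tender_performance_predictions_py filter_tender_performance_predictions_py_alt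
  simp only [List.foldl_cons, List.foldl_nil, pvPass_eq_filter, List.filter_filter]
  rw [PySem.List.foldl_append_if_eq_filter]
  refine (List.filter_congr ?_)
  intro p _
  cases hc : (!(PySem.Dict.getD (PySem.Dict.mk filters) "carriers" []).isEmpty && !pvOptMem (PySem.Dict.get? (PySem.Dict.mk p) "carrier") (PySem.Dict.getD (PySem.Dict.mk filters) "carriers" [])) <;>
  cases hs : (!(PySem.Dict.getD (PySem.Dict.mk filters) "source_cities" []).isEmpty && !pvOptMem (PySem.Dict.get? (PySem.Dict.mk p) "source_city") (PySem.Dict.getD (PySem.Dict.mk filters) "source_cities" [])) <;>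
  cases hd : (!(PySem.Dict.getD (PySem.Dict.mk filters) "destination_cities" []).isEmpty && !pvOptMem (PySem.Dict.get? (PySem.Dict.mk p) "dest_city") (PySem.Dict.getD (PySem.Dict.mk filters) "destination_cities" [])) <;>
  simp_all
  tauto
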